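-- pv_equiv track=rewrite | github.com/KoYeJoon/coding_test_python | Programmers/level2/201228_42626.py | solution
-- ===== SOURCE A (Python) =====
-- import heapq
--
-- def solution(scoville, K):
--     answer = 0
--     heapq.heapify(scoville)
--
--     while scoville[0]<=K :
--         if len(scoville)==1 :
--             return -1
--         answer+=1
--         heapq.heappush(scoville,heapq.heappop(scoville) + heapq.heappop(scoville)*2)
--     return answer
-- ===== SOURCE B (Python) =====
-- def solution(scoville, K):
--     # sorted-list strategy: keep the multiset as an ascending list; combine the two
--     # smallest and re-insert the mix at its binary-searched position.
--     s = sorted(scoville)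
--     answer = 0
--     while s[0] <= K:
--         if len(s) == 1:
--             return -1
--         a = s[0]
--         b = s[1]
--         v = a + b * 2
--         rest = s[2:]
--         lo, hi = 0, len(rest)
--         while lo < hi:
--             mid = (lo + hi) // 2
--             if v < rest[mid]:
--                 hi = mid
--             else:
--                 lo = mid + 1
--         s = rest[:lo] + [v] + rest[lo:]
--         answer += 1
--     return answer
-- ===== Notes on version B (the rewrite author's own statement) =====
-- stated objective: alternative
-- what changed: Replaces the binary heap (heapify/heappop/heappush sift operations) with a plain ascending sorted list: sort once, repeatedly take the two smallest from the front and re-insert the mix at a hand-rolled binary-searched position; note A mutates its argument in place (heapify) while B does not — the equivalence is about the return value.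
import Mathlib
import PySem

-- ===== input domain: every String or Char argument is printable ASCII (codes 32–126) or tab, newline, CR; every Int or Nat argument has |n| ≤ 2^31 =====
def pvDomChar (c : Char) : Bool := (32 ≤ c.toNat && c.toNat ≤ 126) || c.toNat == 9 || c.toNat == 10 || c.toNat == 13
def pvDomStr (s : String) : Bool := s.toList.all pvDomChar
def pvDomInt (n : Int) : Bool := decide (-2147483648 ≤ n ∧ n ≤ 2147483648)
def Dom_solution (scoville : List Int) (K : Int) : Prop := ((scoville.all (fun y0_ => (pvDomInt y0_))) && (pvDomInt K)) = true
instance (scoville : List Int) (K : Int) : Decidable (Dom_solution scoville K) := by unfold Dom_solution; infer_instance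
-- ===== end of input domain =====

-- B keeps the multiset as a sorted list with binary-search insertion instead of A's binary heap
-- (same return value; A additionally heapifies its argument in place, B leaves it untouched).

-- ===== PORT A =====
-- helper: scoville[i] read (indices are always in range in A's runs; 0 is a dummy default)
def pvGet (l : List Int) (i : Nat) : Int := l.getD i 0

-- CPython heapq._siftdown: bubble newitem x up from pos p towards startpos
def sdLoop (start : Nat) (x : Int) (p : Nat) (l : List Int) : List Int :=
  if _h : start < p then
    let pp := (p - 1) / 2
    if x < pvGet l pp then sdLoop start x pp (l.set p (pvGet l pp))
    else l.set p x
  else l.set p x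
termination_by p
decreasing_by omega

-- CPython heapq._siftup's loop: move the hole down to a leaf along the smaller child
def suLoop (e p : Nat) (l : List Int) : Nat × List Int :=
  if h : 2 * p + 1 < e then
    let c := if 2 * p + 2 < e ∧ ¬ (pvGet l (2 * p + 1) < pvGet l (2 * p + 2)) then 2 * p + 2 else 2 * p + 1
    suLoop e c (l.set p (pvGet l c))
  else (p, l)
termination_by e - p
decreasing_by split <;> omega

-- CPython heapq._siftup (ends with a _siftdown call)
def siftup (p : Nat) (l : List Int) : List Int :=
  let x := pvGet l p
  let r := suLoop l.length p l
  sdLoop p x r.1 r.2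

-- heapq.heappush: append, then _siftdown from the last index
def heappush (l : List Int) (item : Int) : List Int :=
  sdLoop 0 item l.length (l ++ [item])

-- heapq.heappop: pop the last element; if nonempty put it at the root and _siftup
def heappop (l : List Int) : Int × List Int :=
  let lastelt := pvGet l (l.length - 1)
  let rest := l.dropLast
  if rest.isEmpty then (lastelt, rest)
  else (pvGet rest 0, siftup 0 (rest.set 0 lastelt))

-- heapq.heapify: _siftup for i in reversed(range(n//2))
def heapify (l : List Int) : List Int :=
  (List.range (l.length / 2)).reverse.foldl (fun h i => siftup i h) l

-- the while loop of A (fuel = initial length, enough since each iteration shrinks the heap)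
def loopA : Nat → List Int → Int → Int → Int
  | 0, _, _, ans => ans
  | fuel + 1, heap, K, ans =>
    if pvGet heap 0 ≤ K then
      if heap.length == 1 then -1
      else
        let p1 := heappop heap
        let p2 := heappop p1.2
        loopA fuel (heappush p2.2 (p1.1 + p2.1 * 2)) K (ans + 1)
    else ans

def solution (scoville : List Int) (K : Int) : Int :=
  loopA scoville.length (heapify scoville) K 0

-- ===== PORT B =====
-- Source B's hand-rolled bisect_right loop on rest
def bis (v : Int) (r : List Int) (lo hi : Nat) : Nat :=
  if _h : lo < hi then
    let mid := (lo + hi) / 2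
    if v < pvGet r mid then bis v r lo mid else bis v r (mid + 1) hi
  else lo
termination_by hi - lo
decreasing_by all_goals omega

-- the while loop of B over the sorted list (same fuel)
def loopB : Nat → List Int → Int → Int → Int
  | 0, _, _, ans => ans
  | fuel + 1, s, K, ans =>
    if pvGet s 0 ≤ K then
      if s.length == 1 then -1
      else
        match s with
        | a :: b :: rest =>
          let v := a + b * 2
          let lo := bis v rest 0 rest.length
          loopB fuel (rest.take lo ++ v :: rest.drop lo) K (ans + 1)
        | _ => ans
    else ans

def solution_alt (scoville : List Int) (K : Int) : Int :=
  let s := PySem.List.sorted scoville (fun x => x)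
  loopB s.length s K 0

-- ===== PRECONDITION & SPEC =====
-- Pre_ excludes only the empty list, on which A raises IndexError at scoville[0] (B raises there too).
def Pre_solution (scoville : List Int) (K : Int) : Prop := scoville ≠ []
instance (scoville : List Int) (K : Int) : Decidable (Pre_solution scoville K) := by unfold Pre_solution; infer_instance
def pvWitness_solution : List Int × Int := ([1, 2, 3, 9, 10, 12], 7)

def Spec_solution (scoville : List Int) (K : Int) (out : Int) : Prop := out = solution_alt scoville K
instance (scoville : List Int) (K : Int) (out : Int) : Decidable (Spec_solution scoville K out) := by unfold Spec_solution; infer_instance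

-- ===== CLAIM (what is proved, stated in full; the proofs are below) =====
def Claim_equal_solution : Prop := ∀ (scoville : List Int) (K : Int), Dom_solution scoville K → Pre_solution scoville K → Spec_solution scoville K (solution scoville K)


-- ===== LEMMAS AND PROOFS =====

-- parent index in the implicit binary-heap tree
def hpar (j : Nat) : Nat := (j - 1) / 2

-- p lies in the subtree rooted at s (s is reachable from p by iterating hpar)
def Desc (s p : Nat) : Prop := if s < p then Desc s (hpar p) else p = s
termination_by p
decreasing_by simp only [hpar]; omega

-- heap property for all parent/child pairs whose parent index is ≥ k
def HA (l : List Int) (k : Nat) : Prop :=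
  ∀ j, 0 < j → j < l.length → k ≤ hpar j → pvGet l (hpar j) ≤ pvGet l j

-- sift invariant: heap property (parents ≥ i) except pairs touching the hole p
def SdInv1 (i : Nat) (l : List Int) (p : Nat) : Prop :=
  ∀ j, 0 < j → j < l.length → i ≤ hpar j → j ≠ p → hpar j ≠ p → pvGet l (hpar j) ≤ pvGet l j

-- bridge invariant: the hole's parent is ≤ the hole's children
def SdInv3 (i : Nat) (l : List Int) (p : Nat) : Prop :=
  i < p → ∀ j, 0 < j → j < l.length → hpar j = p → pvGet l (hpar p) ≤ pvGet l j

lemma desc_iff (s p : Nat) : Desc s p ↔ if s < p then Desc s (hpar p) else p = s := by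
  conv_lhs => rw [Desc]

lemma desc_le {s p : Nat} (h : Desc s p) : s ≤ p := by
  rw [desc_iff] at h; by_cases hc : s < p <;> simp [hc] at h <;> omega

lemma desc_par {s p : Nat} (h : Desc s p) (hne : s < p) : Desc s (hpar p) := by
  rw [desc_iff] at h; simpa [hne] using h

lemma desc_step {s p : Nat} (hlt : s < p) (h : Desc s (hpar p)) : Desc s p := by
  rw [desc_iff]; simpa [hlt] using h

lemma desc_zero (p : Nat) : Desc 0 p := by
  induction p using Nat.strong_induction_on with
  | _ p ih =>
    rw [desc_iff]
    rcases Nat.eq_zero_or_pos p with h | h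
    · simp [h]
    · simpa [h] using ih _ (by simp only [hpar]; omega)

lemma pvGet_set_self {l : List Int} {i : Nat} (v : Int) (h : i < l.length) :
    pvGet (l.set i v) i = v := by simp [pvGet, List.getD, h]

lemma pvGet_set_ne {l : List Int} {i j : Nat} (v : Int) (h : i ≠ j) :
    pvGet (l.set i v) j = pvGet l j := by simp [pvGet, List.getD, h]

lemma pvGet_eq_getElem {l : List Int} {j : Nat} (h : j < l.length) : pvGet l j = l[j] := by
  simp [pvGet, List.getD, List.getElem?_eq_getElem h]

lemma set_pvGet_self {l : List Int} {i : Nat} (h : i < l.length) : l.set i (pvGet l i) = l := by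
  rw [pvGet_eq_getElem h]; exact List.set_getElem_self h

lemma cons_set_swap (t : List Int) : ∀ (j : Nat) (a b : Int), j < t.length →
    (a :: t.set j b).Perm (b :: t.set j a) := by
  induction t with
  | nil => intro j a b h; simp at h
  | cons h t ih =>
    intro j a b hj
    cases j with
    | zero => simpa using List.Perm.swap b a t
    | succ j =>
      simp only [List.set]
      exact ((List.Perm.swap h a _).trans ((ih j a b (by simpa using hj)).cons h)).trans
        (List.Perm.swap b h _)

lemma set_set_perm : ∀ (l : List Int) (p c : Nat) (x : Int), p ≠ c → p < l.length → c < l.length →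
    ((l.set p (pvGet l c)).set c x).Perm (l.set p x) := by
  intro l
  induction l with
  | nil => intro p c x _ hp _; simp at hp
  | cons h t ih =>
    intro p c x hpc hp hc
    cases p with
    | zero =>
      cases c with
      | zero => omega
      | succ c =>
        have hc' : c < t.length := by simpa using hc
        have h1 : pvGet (h :: t) (c + 1) = pvGet t c := by simp [pvGet]
        simp only [List.set, h1]
        calc (pvGet t c :: t.set c x).Perm (x :: t.set c (pvGet t c)) := cons_set_swap t c _ x hc'
          _ = x :: t := by rw [set_pvGet_self hc']
    | succ p =>
      cases c with
      | zero =>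
        have hp' : p < t.length := by simpa using hp
        have h1 : pvGet (h :: t) 0 = h := by simp [pvGet]
        simp only [List.set, h1]
        exact cons_set_swap t p x h hp'
      | succ c =>
        have h1 : pvGet (h :: t) (c + 1) = pvGet t c := by simp [pvGet]
        simp only [List.set, h1]
        exact (ih p c x (by omega) (by simpa using hp) (by simpa using hc)).cons h

lemma hpar_lt {m : Nat} (h : 0 < m) : hpar m < m := by simp only [hpar]; omega

lemma sdLoop_eq (start : Nat) (x : Int) (p : Nat) (l : List Int) :
    sdLoop start x p l =
      if start < p then
        (if x < pvGet l ((p - 1) / 2) then sdLoop start x ((p - 1) / 2) (l.set p (pvGet l ((p - 1) / 2)))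
         else l.set p x)
      else l.set p x := by
  conv_lhs => rw [sdLoop]
  split <;> rfl

lemma sdLoop_spec (i : Nat) (x : Int) : ∀ p (l : List Int), Desc i p → p < l.length →
    SdInv1 i l p →
    (∀ j, 0 < j → j < l.length → hpar j = p → x ≤ pvGet l j) →
    SdInv3 i l p →
    HA (sdLoop i x p l) i ∧ (sdLoop i x p l).Perm (l.set p x) ∧
      (sdLoop i x p l).length = l.length := by
  intro p
  induction p using Nat.strong_induction_on with
  | _ p ih =>
    intro l hdesc hp h1 h2 h3
    rw [sdLoop_eq]
    by_cases hip : i < p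
    · rw [if_pos hip]
      have hpp : (p - 1) / 2 = hpar p := rfl
      have hpplt : hpar p < p := hpar_lt (by omega)
      rw [hpp]
      by_cases hx : x < pvGet l (hpar p)
      · rw [if_pos hx]
        have hdesc' : Desc i (hpar p) := desc_par hdesc hip
        have hipp : i ≤ hpar p := desc_le hdesc'
        have hgp : pvGet (l.set p (pvGet l (hpar p))) p = pvGet l (hpar p) := pvGet_set_self _ hp
        have hgne : ∀ j, j ≠ p → pvGet (l.set p (pvGet l (hpar p))) j = pvGet l j := by
          intro j hj; exact pvGet_set_ne _ (by omega)
        have inv1 : SdInv1 i (l.set p (pvGet l (hpar p))) (hpar p) := by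
          intro j hj0 hjlen hij hjne hparne
          simp only [List.length_set] at hjlen
          by_cases hjp : j = p
          · exact absurd (hjp ▸ rfl) hparne
          · rw [hgne j hjp]
            by_cases hparp : hpar j = p
            · rw [hparp, hgp, ← hpp]
              exact h3 hip j hj0 hjlen hparp
            · rw [hgne _ hparp]
              exact h1 j hj0 hjlen hij hjp hparp
        have inv2 : ∀ j, 0 < j → j < (l.set p (pvGet l (hpar p))).length → hpar j = hpar p →
            x ≤ pvGet (l.set p (pvGet l (hpar p))) j := by
          intro j hj0 hjlen hparj
          simp only [List.length_set] at hjlen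
          by_cases hjp : j = p
          · rw [hjp, hgp]; exact le_of_lt hx
          · rw [hgne j hjp]
            have := h1 j hj0 hjlen (hparj ▸ hipp) hjp (by omega)
            rw [hparj] at this
            exact le_trans (le_of_lt hx) this
        have inv3 : SdInv3 i (l.set p (pvGet l (hpar p))) (hpar p) := by
          intro hipp' j hj0 hjlen hparj
          simp only [List.length_set] at hjlen
          have hppne : hpar (hpar p) ≠ p := by
            have := hpar_lt (show 0 < hpar p by omega); omega
          have key : pvGet l (hpar (hpar p)) ≤ pvGet l (hpar p) :=
            h1 (hpar p) (by omega) (by omega) (desc_le (desc_par hdesc' hipp')) (by omega) hppne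
          rw [hgne _ hppne]
          by_cases hjp : j = p
          · rw [hjp, hgp]; exact key
          · rw [hgne j hjp]
            have := h1 j hj0 hjlen (hparj ▸ le_of_lt hipp') hjp (by omega)
            rw [hparj] at this
            exact le_trans key this
        obtain ⟨hHA, hperm, hlen⟩ := ih (hpar p) hpplt (l.set p (pvGet l (hpar p))) hdesc'
          (by simpa using lt_trans hpplt hp) inv1 inv2 inv3
        exact ⟨hHA, hperm.trans (set_set_perm l p (hpar p) x (by omega) hp (by omega)),
          by simpa using hlen⟩
      · rw [if_neg hx]
        refine ⟨?_, List.Perm.refl _, by simp⟩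
        intro j hj0 hjlen hij
        simp only [List.length_set] at hjlen
        by_cases hjp : j = p
        · subst hjp
          have e1 : pvGet (l.set j x) (hpar j) = pvGet l (hpar j) :=
            pvGet_set_ne _ (by have := hpar_lt hj0; omega)
          have e2 : pvGet (l.set j x) j = x := pvGet_set_self _ hp
          rw [e1, e2]
          exact le_of_not_gt hx
        · by_cases hparp : hpar j = p
          · rw [hparp, pvGet_set_self _ hp, pvGet_set_ne _ (by omega)]
            exact h2 j hj0 hjlen hparp
          · rw [pvGet_set_ne _ (by omega), pvGet_set_ne _ (by omega)]
            exact h1 j hj0 hjlen hij hjp hparp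
    · rw [if_neg hip]
      have hpi : p = i := by have := desc_le hdesc; omega
      refine ⟨?_, List.Perm.refl _, by simp⟩
      intro j hj0 hjlen hij
      simp only [List.length_set] at hjlen
      by_cases hjp : j = p
      · exfalso; have := hpar_lt hj0; omega
      · by_cases hparp : hpar j = p
        · rw [hparp, pvGet_set_self _ hp, pvGet_set_ne _ (by omega)]
          exact h2 j hj0 hjlen hparp
        · rw [pvGet_set_ne _ (by omega), pvGet_set_ne _ (by omega)]
          exact h1 j hj0 hjlen hij hjp hparp

lemma suLoop_eq (e p : Nat) (l : List Int) :
    suLoop e p l =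
      if 2 * p + 1 < e then
        suLoop e (if 2 * p + 2 < e ∧ ¬ (pvGet l (2 * p + 1) < pvGet l (2 * p + 2)) then 2 * p + 2 else 2 * p + 1)
          (l.set p (pvGet l (if 2 * p + 2 < e ∧ ¬ (pvGet l (2 * p + 1) < pvGet l (2 * p + 2)) then 2 * p + 2 else 2 * p + 1)))
      else (p, l) := by
  conv_lhs => rw [suLoop]
  split <;> rfl

lemma suLoop_spec (i e : Nat) : ∀ d p (l : List Int), e - p ≤ d → l.length = e → Desc i p → p < e →
    SdInv1 i l p → SdInv3 i l p →
    (suLoop e p l).2.length = e ∧ (suLoop e p l).1 < e ∧ Desc i (suLoop e p l).1 ∧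
      e ≤ 2 * (suLoop e p l).1 + 1 ∧
      (∀ x, ((suLoop e p l).2.set (suLoop e p l).1 x).Perm (l.set p x)) ∧
      SdInv1 i (suLoop e p l).2 (suLoop e p l).1 ∧ SdInv3 i (suLoop e p l).2 (suLoop e p l).1 := by
  intro d
  induction d with
  | zero => intro p l hd _ _ hp _ _; omega
  | succ d ih =>
    intro p l hd hlen hdesc hp h1 h3
    rw [suLoop_eq]
    by_cases hc : 2 * p + 1 < e
    · rw [if_pos hc]
      set C := if 2 * p + 2 < e ∧ ¬ (pvGet l (2 * p + 1) < pvGet l (2 * p + 2)) then 2 * p + 2 else 2 * p + 1 with hC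
      have hfacts : (C = 2 * p + 1 ∨ C = 2 * p + 2) ∧ C < e ∧
          (∀ j, 0 < j → j < e → hpar j = p → pvGet l C ≤ pvGet l j) := by
        by_cases hch : 2 * p + 2 < e ∧ ¬ (pvGet l (2 * p + 1) < pvGet l (2 * p + 2))
        · rw [hC, if_pos hch]
          refine ⟨Or.inr rfl, hch.1, ?_⟩
          intro j hj0 hje hpj
          have hj12 : j = 2 * p + 1 ∨ j = 2 * p + 2 := by simp only [hpar] at hpj; omega
          rcases hj12 with hj | hj <;> subst hj
          · exact le_of_not_gt hch.2
          · exact le_refl _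
        · rw [hC, if_neg hch]
          refine ⟨Or.inl rfl, hc, ?_⟩
          intro j hj0 hje hpj
          have hj12 : j = 2 * p + 1 ∨ j = 2 * p + 2 := by simp only [hpar] at hpj; omega
          rcases hj12 with hj | hj <;> subst hj
          · exact le_refl _
          · refine le_of_lt ?_
            by_contra hno
            exact hch ⟨hje, hno⟩
      obtain ⟨hcr, hce, hmin⟩ := hfacts
      have hpc : p < C := by omega
      have hparc : hpar C = p := by rcases hcr with h | h <;> rw [h] <;> simp only [hpar] <;> omega
      have hgp : pvGet (l.set p (pvGet l C)) p = pvGet l C := pvGet_set_self _ (by omega)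
      have hgne : ∀ j, j ≠ p → pvGet (l.set p (pvGet l C)) j = pvGet l j := by
        intro j hj; exact pvGet_set_ne _ (by omega)
      have hdesc' : Desc i C := desc_step (by have := desc_le hdesc; omega) (hparc ▸ hdesc)
      have inv1 : SdInv1 i (l.set p (pvGet l C)) C := by
        intro j hj0 hjlen hij hjne hparne
        simp only [List.length_set, hlen] at hjlen
        by_cases hjp : j = p
        · subst hjp
          have hpp : hpar j ≠ j := by have := hpar_lt hj0; omega
          have hppC : hpar j ≠ C := by have := hpar_lt hj0; omega
          rw [hgne _ (by omega), hgp]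
          have hip : i < j := by have := hpar_lt hj0; omega
          exact h3 hip C (by omega) (by omega) hparc
        · rw [hgne j hjp]
          by_cases hparp : hpar j = p
          · rw [hparp, hgp]
            exact hmin j hj0 hjlen hparp
          · rw [hgne _ hparp]
            exact h1 j hj0 (by omega) hij hjp hparp
      have inv3 : SdInv3 i (l.set p (pvGet l C)) C := by
        intro hic j hj0 hjlen hparj
        simp only [List.length_set, hlen] at hjlen
        have hjbig : C < j := hparj ▸ hpar_lt hj0
        rw [hparc, hgp, hgne j (by omega), ← hparj]
        exact h1 j hj0 (by omega) (by omega) (by omega) (by omega)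
      obtain ⟨r1, r2, r3, r4, r5, r6, r7⟩ := ih C (l.set p (pvGet l C)) (by omega)
        (by simpa using hlen) hdesc' hce inv1 inv3
      refine ⟨r1, r2, r3, r4, ?_, r6, r7⟩
      intro x
      exact (r5 x).trans (set_set_perm l p C x (by omega) (by omega) (by omega))
    · rw [if_neg hc]
      exact ⟨hlen, hp, hdesc, by omega, fun x => List.Perm.refl _, h1, h3⟩

lemma siftup_spec (i : Nat) (l : List Int) (hi : i < l.length) (h : HA l (i + 1)) :
    HA (siftup i l) i ∧ (siftup i l).Perm l ∧ (siftup i l).length = l.length := by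
  have hsif : siftup i l = sdLoop i (pvGet l i) (suLoop l.length i l).1 (suLoop l.length i l).2 := rfl
  rw [hsif]
  have h1 : SdInv1 i l i := by
    intro j hj0 hjlen hij hjne hparne
    exact h j hj0 hjlen (by omega)
  have h3 : SdInv3 i l i := by intro hii; omega
  obtain ⟨r1, r2, r3, r4, r5, r6, r7⟩ := suLoop_spec i l.length l.length i l (by omega) rfl
    (by rw [desc_iff]; simp) hi h1 h3
  obtain ⟨s1, s2, s3⟩ := sdLoop_spec i (pvGet l i) (suLoop l.length i l).1 (suLoop l.length i l).2
    r3 (by omega) r6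
    (by
      intro j hj0 hjlen hparj
      exfalso
      rw [r1] at hjlen
      have := hpar_lt hj0
      simp only [hpar] at hparj
      omega)
    r7
  refine ⟨s1, ?_, by rw [s3, r1]⟩
  have := (r5 (pvGet l i)).trans (by rw [set_pvGet_self hi])
  exact s2.trans this

lemma HA_half (l : List Int) : HA l (l.length / 2) := by
  intro j hj0 hjlen hij
  exfalso
  simp only [hpar] at hij
  omega

lemma heapify_fold (l₀ : List Int) : ∀ (k : Nat) (m : List Int), 2 * k ≤ m.length → HA m k →
    m.Perm l₀ →
    HA ((List.range k).reverse.foldl (fun h i => siftup i h) m) 0 ∧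
      ((List.range k).reverse.foldl (fun h i => siftup i h) m).Perm l₀ ∧
      ((List.range k).reverse.foldl (fun h i => siftup i h) m).length = m.length := by
  intro k
  induction k with
  | zero => intro m _ hm hperm; exact ⟨hm, hperm, rfl⟩
  | succ k ih =>
    intro m hk hm hperm
    rw [List.range_succ, List.reverse_append, List.reverse_singleton, List.singleton_append,
      List.foldl_cons]
    obtain ⟨t1, t2, t3⟩ := siftup_spec k m (by omega) hm
    obtain ⟨u1, u2, u3⟩ := ih (siftup k m) (by omega) t1 (t2.trans hperm)
    exact ⟨u1, u2, by rw [u3, t3]⟩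

lemma heapify_spec (l : List Int) :
    HA (heapify l) 0 ∧ (heapify l).Perm l ∧ (heapify l).length = l.length := by
  unfold heapify
  exact heapify_fold l (l.length / 2) l (by omega) (HA_half l) (List.Perm.refl l)

lemma heappush_spec (l : List Int) (v : Int) (h : HA l 0) :
    HA (heappush l v) 0 ∧ (heappush l v).Perm (v :: l) ∧ (heappush l v).length = l.length + 1 := by
  have hpu : heappush l v = sdLoop 0 v l.length (l ++ [v]) := rfl
  rw [hpu]
  have hlen : (l ++ [v]).length = l.length + 1 := by simp
  have hget : ∀ j, j < l.length → pvGet (l ++ [v]) j = pvGet l j := by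
    intro j hj
    simp [pvGet, List.getD, List.getElem?_append_left hj]
  have hgetlast : pvGet (l ++ [v]) l.length = v := by simp [pvGet, List.getD]
  obtain ⟨s1, s2, s3⟩ := sdLoop_spec 0 v l.length (l ++ [v]) (desc_zero _) (by omega)
    (by
      intro j hj0 hjlen hij hjne hparne
      rw [hlen] at hjlen
      have hjl : j < l.length := by omega
      have hparl : hpar j < l.length := by have := hpar_lt hj0; omega
      rw [hget j hjl, hget _ hparl]
      exact h j hj0 hjl (by omega))
    (by
      intro j hj0 hjlen hparj
      exfalso
      rw [hlen] at hjlen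
      simp only [hpar] at hparj
      omega)
    (by
      intro hlp j hj0 hjlen hparj
      exfalso
      rw [hlen] at hjlen
      simp only [hpar] at hparj
      omega)
  refine ⟨s1, ?_, by rw [s3, hlen]⟩
  have hset : (l ++ [v]).set l.length v = l ++ [v] := by
    rw [List.set_eq_take_append_cons_drop]
    simp
  rw [hset] at s2
  exact s2.trans (List.perm_append_singleton v l)

lemma heap_min (l : List Int) (h : HA l 0) : ∀ j, j < l.length → pvGet l 0 ≤ pvGet l j := by
  intro j
  induction j using Nat.strong_induction_on with
  | _ j ihj =>
    intro hj
    rcases Nat.eq_zero_or_pos j with hj0 | hj0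
    · subst hj0; exact le_refl _
    · have hstep := h j hj0 hj (by omega)
      have := ihj (hpar j) (hpar_lt hj0) (by have := hpar_lt hj0; omega)
      exact le_trans this hstep

lemma heappop_spec (l : List Int) (h : HA l 0) (hne : l ≠ []) :
    (heappop l).1 = pvGet l 0 ∧ HA (heappop l).2 0 ∧ ((heappop l).1 :: (heappop l).2).Perm l ∧
      (heappop l).2.length = l.length - 1 := by
  have hlen0 : 0 < l.length := List.length_pos_iff.mpr hne
  have hdl : l.dropLast.length = l.length - 1 := by simp
  unfold heappop
  by_cases hemp : l.dropLast.isEmpty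
  · simp only [if_pos hemp]
    have hlen1 : l.length = 1 := by
      rw [List.isEmpty_iff] at hemp
      have := hdl
      rw [hemp] at this
      simp only [List.length_nil] at this
      omega
    obtain ⟨a, ha⟩ := List.length_eq_one_iff.mp hlen1
    subst ha
    refine ⟨rfl, ?_, ?_, rfl⟩
    · intro j hj0 hjlen _; exact absurd hjlen (by simp)
    · simp [pvGet, List.getD]
  · simp only [if_neg hemp]
    have hrne : l.dropLast ≠ [] := by simpa [List.isEmpty_iff] using hemp
    have hrlen : 0 < l.dropLast.length := List.length_pos_iff.mpr hrne
    have hlen2 : 2 ≤ l.length := by omega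
    set last := pvGet l (l.length - 1) with hlast
    set rest := l.dropLast with hrest
    have hgetr : ∀ j, j < rest.length → pvGet rest j = pvGet l j := by
      intro j hj
      rw [hrest] at hj ⊢
      rw [pvGet_eq_getElem hj, pvGet_eq_getElem (by simp at hj ⊢; omega)]
      simp [List.getElem_dropLast]
    -- heap property of rest.set 0 last above parent index 1
    have hHA1 : HA (rest.set 0 last) 1 := by
      intro j hj0 hjlen hij
      simp only [List.length_set] at hjlen
      have hjne : j ≠ 0 := by omega
      have hparne : hpar j ≠ 0 := by omega
      rw [pvGet_set_ne _ (Ne.symm hjne), pvGet_set_ne _ (Ne.symm hparne),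
        hgetr j hjlen, hgetr _ (by have := hpar_lt hj0; omega)]
      exact h j hj0 (by rw [hrest] at hjlen; simp at hjlen; omega) (by omega)
    obtain ⟨t1, t2, t3⟩ := siftup_spec 0 (rest.set 0 last) (by simpa using hrlen) hHA1
    have hg0 : pvGet rest 0 = pvGet l 0 := hgetr 0 hrlen
    refine ⟨hg0, t1, ?_, by simp only [t3, List.length_set]; rw [hrest]; simp⟩
    -- permutation: pvGet rest 0 :: siftup ... ~ l
    have hperm1 : (pvGet rest 0 :: siftup 0 (rest.set 0 last)).Perm (pvGet rest 0 :: rest.set 0 last) :=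
      t2.cons _
    -- rest = head :: tail, rest.set 0 last = last :: tail
    obtain ⟨hd, tl, hht⟩ : ∃ hd tl, rest = hd :: tl := by
      cases hrne' : rest with
      | nil => exact absurd hrne' hrne
      | cons a b => exact ⟨a, b, rfl⟩
    have hhd : pvGet rest 0 = hd := by rw [hht]; simp [pvGet]
    have hperm2 : (pvGet rest 0 :: rest.set 0 last).Perm (rest ++ [last]) := by
      rw [hhd, hht]
      simp only [List.set_cons_zero, List.cons_append]
      exact ((List.perm_append_singleton last tl).symm.cons hd)
    have hlast_eq : l.dropLast ++ [l.getLast hne] = l := List.dropLast_concat_getLast hne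
    have hlastv : l.getLast hne = last := by
      rw [hlast, List.getLast_eq_getElem, pvGet_eq_getElem (by omega)]
    have hperm3 : (rest ++ [last]).Perm l := by
      rw [hrest, ← hlastv, hlast_eq]
    exact (hperm1.trans hperm2).trans hperm3

lemma pairwise_mono {r : List Int} (hr : List.Pairwise (· ≤ ·) r) {i j : Nat}
    (hij : i ≤ j) (hj : j < r.length) : pvGet r i ≤ pvGet r j := by
  rcases Nat.lt_or_ge i j with h | h
  · rw [pvGet_eq_getElem (by omega), pvGet_eq_getElem hj]
    exact List.pairwise_iff_getElem.mp hr i j (by omega) hj h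
  · have : i = j := by omega
    rw [this]

lemma bis_eq (v : Int) (r : List Int) (lo hi : Nat) :
    bis v r lo hi =
      if lo < hi then
        (if v < pvGet r ((lo + hi) / 2) then bis v r lo ((lo + hi) / 2) else bis v r ((lo + hi) / 2 + 1) hi)
      else lo := by
  conv_lhs => rw [bis]
  split <;> rfl

lemma bis_spec (v : Int) (r : List Int) (hr : List.Pairwise (· ≤ ·) r) :
    ∀ d lo hi, hi - lo ≤ d → lo ≤ hi → hi ≤ r.length →
    (∀ j, j < lo → pvGet r j ≤ v) → (∀ j, hi ≤ j → j < r.length → v < pvGet r j) →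
    bis v r lo hi ≤ r.length ∧ (∀ j, j < bis v r lo hi → pvGet r j ≤ v) ∧
      (∀ j, bis v r lo hi ≤ j → j < r.length → v < pvGet r j) := by
  intro d
  induction d with
  | zero =>
    intro lo hi hd hlohi hhi hlow hhigh
    have : hi = lo := by omega
    subst this
    rw [bis_eq, if_neg (by omega)]
    exact ⟨by omega, hlow, fun j hj hjl => hhigh j hj hjl⟩
  | succ d ih =>
    intro lo hi hd hlohi hhi hlow hhigh
    rw [bis_eq]
    by_cases hlt : lo < hi
    · rw [if_pos hlt]
      have hmid1 : lo ≤ (lo + hi) / 2 := by omega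
      have hmid2 : (lo + hi) / 2 < hi := by omega
      by_cases hv : v < pvGet r ((lo + hi) / 2)
      · rw [if_pos hv]
        refine ih lo ((lo + hi) / 2) (by omega) hmid1 (by omega) hlow ?_
        intro j hj hjl
        exact lt_of_lt_of_le hv (pairwise_mono hr hj hjl)
      · rw [if_neg hv]
        refine ih ((lo + hi) / 2 + 1) hi (by omega) (by omega) hhi ?_ hhigh
        intro j hj
        exact le_trans (pairwise_mono hr (by omega) (by omega)) (le_of_not_gt hv)
    · rw [if_neg hlt]
      exact ⟨by omega, hlow, fun j hj hjl => hhigh j (by omega) hjl⟩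

lemma insort_spec (v : Int) (r : List Int) (hr : List.Pairwise (· ≤ ·) r) :
    List.Pairwise (· ≤ ·) (r.take (bis v r 0 r.length) ++ v :: r.drop (bis v r 0 r.length)) ∧
      (r.take (bis v r 0 r.length) ++ v :: r.drop (bis v r 0 r.length)).Perm (v :: r) := by
  obtain ⟨hq, hlow, hhigh⟩ := bis_spec v r hr r.length 0 r.length (by omega) (by omega) (le_refl _)
    (by omega) (by omega)
  set q := bis v r 0 r.length with hqdef
  have htl : (r.take q).length = q := by simp [hq]
  have htake : ∀ x ∈ r.take q, x ≤ v := by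
    intro x hx
    obtain ⟨j, hj, hje⟩ := List.mem_iff_getElem.mp hx
    rw [List.getElem_take] at hje
    rw [htl] at hj
    rw [← hje, ← pvGet_eq_getElem (by omega)]
    exact hlow j hj
  have hdrop : ∀ y ∈ r.drop q, v < y := by
    intro y hy
    obtain ⟨j, hj, hje⟩ := List.mem_iff_getElem.mp hy
    rw [List.getElem_drop] at hje
    simp only [List.length_drop] at hj
    rw [← hje, ← pvGet_eq_getElem (by omega)]
    exact hhigh (q + j) (by omega) (by omega)
  constructor
  · rw [List.pairwise_append]
    refine ⟨hr.sublist (List.take_sublist _ _), ?_, ?_⟩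
    · rw [List.pairwise_cons]
      exact ⟨fun y hy => le_of_lt (hdrop y hy), hr.sublist (List.drop_sublist _ _)⟩
    · intro x hx y hy
      rcases List.mem_cons.mp hy with hyv | hyd
      · rw [hyv]; exact htake x hx
      · exact le_trans (htake x hx) (le_of_lt (hdrop y hyd))
  · have := List.perm_middle (a := v) (l₁ := r.take q) (l₂ := r.drop q)
    rw [List.take_append_drop] at this
    exact this

lemma min_head_eq (heap s : List Int) (hperm : heap.Perm s) (hHA : HA heap 0)
    (hs : List.Pairwise (· ≤ ·) s) (a : Int) (t : List Int) (hst : s = a :: t) :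
    pvGet heap 0 = a := by
  have hlenh : heap.length = s.length := hperm.length_eq
  have hlen : 0 < heap.length := by rw [hlenh, hst]; simp
  have hmem : a ∈ heap := hperm.mem_iff.mpr (by rw [hst]; exact List.mem_cons_self)
  obtain ⟨j, hj, hje⟩ := List.mem_iff_getElem.mp hmem
  have h1 : pvGet heap 0 ≤ a := by
    rw [← hje, ← pvGet_eq_getElem hj]
    exact heap_min heap hHA j hj
  have hmem0 : pvGet heap 0 ∈ s := by
    rw [pvGet_eq_getElem hlen]
    exact hperm.mem_iff.mp (List.getElem_mem hlen)
  have h2 : a ≤ pvGet heap 0 := by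
    rw [hst] at hmem0
    rcases List.mem_cons.mp hmem0 with h | h
    · rw [h]
    · rw [hst] at hs
      exact (List.pairwise_cons.mp hs).1 _ h
  omega

lemma bisim : ∀ (n : Nat) (heap s : List Int) (K ans : Int), heap.Perm s → HA heap 0 →
    List.Pairwise (· ≤ ·) s → s ≠ [] → loopA n heap K ans = loopB n s K ans := by
  intro n
  induction n with
  | zero => intro heap s K ans _ _ _ _; rfl
  | succ n ih =>
    intro heap s K ans hperm hHA hs hsne
    have hlen : heap.length = s.length := hperm.length_eq
    obtain ⟨a, t, hst⟩ : ∃ a t, s = a :: t := by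
      cases s with
      | nil => exact absurd rfl hsne
      | cons a t => exact ⟨a, t, rfl⟩
    have hhead : pvGet heap 0 = a := min_head_eq heap s hperm hHA hs a t hst
    have hheads : pvGet s 0 = a := by rw [hst]; simp [pvGet]
    simp only [loopA, loopB, hhead, hheads, hlen]
    by_cases hK : a ≤ K
    · rw [if_pos hK, if_pos hK]
      by_cases h1 : s.length = 1
      · rw [if_pos (show (s.length == 1) = true by simpa using h1),
            if_pos (show (s.length == 1) = true by simpa using h1)]
      · rw [if_neg (show ¬ (s.length == 1) = true by simpa using h1),
            if_neg (show ¬ (s.length == 1) = true by simpa using h1)]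
        have hlen2 : 2 ≤ s.length := by rw [hst] at h1 ⊢; simp only [List.length_cons] at h1 ⊢; omega
        obtain ⟨b, rest, htr⟩ : ∃ b rest, t = b :: rest := by
          cases t with
          | nil => rw [hst] at hlen2; simp at hlen2
          | cons b rest => exact ⟨b, rest, rfl⟩
        subst htr
        -- A side: first pop
        have hhne : heap ≠ [] := by
          intro hcon; rw [hcon] at hlen; rw [hst] at hlen; simp at hlen
        obtain ⟨p11, p12, p13, p14⟩ := heappop_spec heap hHA hhne
        have hp11 : (heappop heap).1 = a := by rw [p11, hhead]
        have hp1perm : (heappop heap).2.Perm (b :: rest) := by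
          have := p13.trans (hperm.trans (by rw [hst]))
          rw [hp11] at this
          exact this.cons_inv
        -- second pop
        have hp2ne : (heappop heap).2 ≠ [] := by
          intro hcon
          have := hp1perm.length_eq
          rw [hcon] at this
          simp at this
        obtain ⟨p21, p22, p23, p24⟩ := heappop_spec (heappop heap).2 p12 hp2ne
        have hsrt : List.Pairwise (· ≤ ·) (b :: rest) := by
          rw [hst] at hs
          exact (List.pairwise_cons.mp hs).2
        have hp21 : (heappop (heappop heap).2).1 = b := by
          rw [p21]
          exact min_head_eq _ _ hp1perm p12 hsrt b rest rfl
        have hp2perm : (heappop (heappop heap).2).2.Perm rest := by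
          have := p23.trans hp1perm
          rw [hp21] at this
          exact this.cons_inv
        -- push
        obtain ⟨q1, q2, q3⟩ := heappush_spec (heappop (heappop heap).2).2 (a + b * 2) p22
        -- B side insert
        have hrest : List.Pairwise (· ≤ ·) rest := (List.pairwise_cons.mp hsrt).2
        obtain ⟨w1, w2⟩ := insort_spec (a + b * 2) rest hrest
        -- new permutation between the two states
        have hnewperm : (heappush (heappop (heappop heap).2).2 (a + b * 2)).Perm
            (rest.take (bis (a + b * 2) rest 0 rest.length) ++ (a + b * 2) :: rest.drop (bis (a + b * 2) rest 0 rest.length)) :=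
          (q2.trans ((hp2perm.cons _))).trans w2.symm
        rw [hst]
        rw [hp11, hp21]
        exact ih _ _ K (ans + 1) hnewperm q1 w1 (by simp)
    · rw [if_neg hK, if_neg hK]

-- ===== VERDICT (by name: the statement is the Claim_ definition above) =====
theorem solution_spec : Claim_equal_solution := by
  intro scoville K _hdom hpre
  unfold Spec_solution solution solution_alt
  have hperm0 : (PySem.List.sorted scoville (fun x => x)).Perm scoville :=
    PySem.List.sorted_perm scoville (fun x => x) false
  have hpair : List.Pairwise (· ≤ ·) (PySem.List.sorted scoville (fun x => x)) := by
    simpa using PySem.List.sorted_pairwise scoville (fun x => x)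
  obtain ⟨hH, hHperm, -⟩ := heapify_spec scoville
  have hsne : PySem.List.sorted scoville (fun x => x) ≠ [] := by
    intro hcon
    apply hpre
    have h0 : scoville.length = 0 := by rw [← hperm0.length_eq, hcon]; rfl
    exact List.eq_nil_of_length_eq_zero h0
  have hlen : (PySem.List.sorted scoville (fun x => x)).length = scoville.length := hperm0.length_eq
  show loopA scoville.length (heapify scoville) K 0 =
    loopB (PySem.List.sorted scoville (fun x => x)).length (PySem.List.sorted scoville (fun x => x)) K 0
  rw [hlen]
  exact bisim _ _ _ K 0 (hHperm.trans hperm0.symm) hH hpair hsne
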